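/-
  SEGMENT .2 OF `vorbis_decode_packet_rest` (0x1112d4–0x111452, the head of the channel loop; stb_vorbis_fixed.c 3225–3242) SPLIT AT THE
  RETURNS OF ITS THREE CALLS OF get_bits: the assertions at the three new cut points, the claims of the four children, and the
  composition `Seg2.of_parts` (pure logic: `ReachVia.trans`; no machine step).

      .2a  0x1112d4–0x11138e, returns into 0x111393   `i < C`, `zero_channel[i] = 0`, `floor = map->submap_floor[map->chan[i].mux]`,
                                                      the type-0 test, `g = &f->floor_config[floor]`, `get_bits(f, 1)`
                                                      exits: At8 (`i ≥ C`), At16 (floor type 0: dead), At2b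
      .2b  0x111393–0x1113fe, returns into 0x111403   `if (get_bits(f,1))`, `range = range_list[g->floor1_multiplier − 1]`,
                                                      `finalY = f->finalY[i]`, `get_bits(f, ilog(range) − 1)`
                                                      exits: At7a (the bit was 0: `error:`), At2c
      .2c  0x111403–0x111421, returns into 0x111426   `finalY[0] = …`, `get_bits(f, ilog(range) − 1)`          exit: At2d
      .2d  0x111426–0x111452                          `finalY[1] = …`, `offset = 2`, `j = 0`, the spills       exit: At3 … i 0

  WHAT IS LIVE ACROSS A CALL: only the callee-saved registers (rbx, rbp, r12 – r15) and the stack slots. Read off the disassembly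
  (c/vorbis_f.dis 1112d4 … 111452):
      0x111393  reads eax (tested; BOTH values are handled by .2b: nothing is asserted of rax), rbx (= g: `[rbx + 0x634]`), r14d (= i:
                0x1113cc), r13 (the exits), r15 (= g, written at 0x111386 and never again: `At3.g`); `[rsp + 0x40]` = f (STABLE).
      0x111403  reads eax (the value stored to `finalY[0]`: any), r12 (= finalY: the store and its check), `[rsp + 0x4c]` (= range:
                ilog's argument; `ilog(range) − 1 ≤ 32` is get_bits's precondition), rbp (= f: get_bits's first argument), r14d, r13,
                r15; `[rsp + 0x20]` = finalY (`At3.slot_finalY`; written at 0x1113ea only).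
      0x111426  reads eax (the value stored to `finalY[1]`: any), r12, r14d (`[0x54]`), r13 (`[0x58]`), r15, rbp (`At3.rbp`);
                `[rsp + 0x20]`. `[rsp + 0x4c]` is dead (`At3`: "a value only").
-/
import Vorbis.Spec.PacketRest
import Vorbis.Spec.PacketRestFrame
namespace Vorbis.Spec.vorbis_decode_packet_rest
open X86 X86.User Asan Vorbis Vorbis.Spec

/-- **Cut 0x111393 (`cut17`): the return of `get_bits(f, 1)`** (line 3233, before `test eax, eax`), channel `i`: STABLE ∧ `r14 = i`,
`i < C` ∧ `r13 = map` ∧ `r15 = g`, a floor of `f` (`g = &f->floor_config[map->submap_floor[map->chan[i].mux]]`, MP6) ∧ `rbx = r15`.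
NOTHING about rax (the bit just read): `rax = 0` leaves through `At7a`, anything else continues — segment .2b handles both. -/
structure At2b (u₀ : State) (others : List Obj) (frames : List (Nat × FrameLayout)) (len : Nat) (Ar : Arena)
    (stored room : Int) (mode : Nat) (ysz : Nat → Nat) (u : State) (ret : Word)
    (i : Nat) (v : State) : Prop
    extends Stable u₀ others frames len Ar stored room mode ysz u ret (lsOf u) v where
  /-- the return address of the call at 0x11138e -/
  rip : v.rip = Vorbis.L.vorbis_decode_packet_rest.cut17
  /-- the channel index (the whole register: `At2.r14`, untouched since) -/
  r14 : v.reg .r14 = UInt64.ofNat i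
  /-- `i < f->channels` (the branch 0x1112e8 was not taken) -/
  i_lt : (i : Int) < stb_vorbis.channels v.mem (fOf u)
  /-- `r13 = map` (`At2.r13`, untouched) -/
  r13 : (v.reg .r13).toNat = mapOf v.mem (fOf u) (mOf u)
  /-- `r15 = g`, the Floor1 record of channel `i` (0x111386) -/
  g : IsFloor v.mem (fOf u) (v.reg .r15).toNat
  /-- `rbx = g` too (0x11137f; the code after the cut addresses `g` through rbx) -/
  rbx : v.reg .rbx = v.reg .r15

/-- **Cut 0x111403 (`cut19`): the return of the first `get_bits(f, ilog(range) − 1)`** (line 3240, before `finalY[0] = …`), channel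
`i`: STABLE ∧ `r14 = i`, `i < C` ∧ `r13 = map` ∧ `r15 = g` ∧ `rbp = f` ∧ `r12 = [0x20] = finalY = f->finalY[i]` ∧ `[0x4c] = range ∈
{256, 128, 86, 64}` (`range_list[g->floor1_multiplier − 1]`, FL7 and SH7). rax, the value to be stored: any. -/
structure At2c (u₀ : State) (others : List Obj) (frames : List (Nat × FrameLayout)) (len : Nat) (Ar : Arena)
    (stored room : Int) (mode : Nat) (ysz : Nat → Nat) (u : State) (ret : Word)
    (i : Nat) (v : State) : Prop
    extends Stable u₀ others frames len Ar stored room mode ysz u ret (lsOf u) v where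
  /-- the return address of the call at 0x1113fe -/
  rip : v.rip = Vorbis.L.vorbis_decode_packet_rest.cut19
  /-- the channel index -/
  r14 : v.reg .r14 = UInt64.ofNat i
  /-- `i < f->channels` -/
  i_lt : (i : Int) < stb_vorbis.channels v.mem (fOf u)
  /-- `r13 = map` -/
  r13 : (v.reg .r13).toNat = mapOf v.mem (fOf u) (mOf u)
  /-- `r15 = g`, the Floor1 record of channel `i` -/
  g : IsFloor v.mem (fOf u) (v.reg .r15).toNat
  /-- `rbp = f` (0x1113d6: reloaded from `[rsp + 0x40]`) -/
  rbp : (v.reg .rbp).toNat = fOf u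
  /-- `r12 = finalY = f->finalY[i]` (0x1113e5) -/
  r12 : (v.reg .r12).toNat = stb_vorbis.finalY v.mem (fOf u) i
  /-- the spill of `finalY` (0x1113ea) -/
  slot_finalY : slot64 u v 0x20 = stb_vorbis.finalY v.mem (fOf u) i
  /-- the spill of `range` (0x1113c8): one of the four entries of `range_list` -/
  slot_range : slot32 u v 0x4c = 256 ∨ slot32 u v 0x4c = 128 ∨ slot32 u v 0x4c = 86 ∨ slot32 u v 0x4c = 64

/-- **Cut 0x111426 (`cut21`): the return of the second `get_bits(f, ilog(range) − 1)`** (line 3241, before `finalY[1] = …`), channel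
`i`: as `At2c` without the `range` slot (dead from here on). rax, the value to be stored: any. -/
structure At2d (u₀ : State) (others : List Obj) (frames : List (Nat × FrameLayout)) (len : Nat) (Ar : Arena)
    (stored room : Int) (mode : Nat) (ysz : Nat → Nat) (u : State) (ret : Word)
    (i : Nat) (v : State) : Prop
    extends Stable u₀ others frames len Ar stored room mode ysz u ret (lsOf u) v where
  /-- the return address of the call at 0x111421 -/
  rip : v.rip = Vorbis.L.vorbis_decode_packet_rest.cut21
  /-- the channel index (spilled to `[0x54]` at 0x111448) -/
  r14 : v.reg .r14 = UInt64.ofNat i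
  /-- `i < f->channels` -/
  i_lt : (i : Int) < stb_vorbis.channels v.mem (fOf u)
  /-- `r13 = map` (spilled to `[0x58]` at 0x11144d) -/
  r13 : (v.reg .r13).toNat = mapOf v.mem (fOf u) (mOf u)
  /-- `r15 = g` (`At3.g`) -/
  g : IsFloor v.mem (fOf u) (v.reg .r15).toNat
  /-- `rbp = f` (`At3.rbp`) -/
  rbp : (v.reg .rbp).toNat = fOf u
  /-- `r12 = finalY = f->finalY[i]` (the store `finalY[1]` at 0x111432) -/
  r12 : (v.reg .r12).toNat = stb_vorbis.finalY v.mem (fOf u) i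
  /-- the spill of `finalY` (`At3.slot_finalY`) -/
  slot_finalY : slot64 u v 0x20 = stb_vorbis.finalY v.mem (fOf u) i

/-- **Segment .2a, 0x1112d4–0x11138e** (lines 3225–3233): `i ≥ C` → .8; `zero_channel[i] = 0`; `floor =
map->submap_floor[map->chan[i].mux]`; floor type 0 → .16 (dead: FL3); otherwise `g = &f->floor_config[floor]` and `get_bits(f, 1)`
returns into 0x111393 (`At2b`). -/
def Seg2a (Lay : Layout) (μ : Microarch) (u₀ : State) : Prop :=
  ∀ (others : List Obj) (frames : List (Nat × FrameLayout)) (len : Nat) (Ar : Arena) (stored room : Int)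
      (mode : Nat) (ysz : Nat → Nat) (u : State) (ret : Word) (i : Nat) (v : State),
    (At2 u₀ others frames len Ar stored room mode ysz u ret i v) →
    ReachVia Lay μ Vorbis.WayInv v (fun w => At8 u₀ others frames len Ar stored room mode ysz u ret w ∨ At16 u₀ others frames len Ar stored room mode ysz u ret w ∨ At2b u₀ others frames len Ar stored room mode ysz u ret i w)

/-- **Segment .2b, 0x111393–0x1113fe** (lines 3233–3240): the bit was 0 → .7 entry A; otherwise `range`, `finalY = f->finalY[i]`,
`ilog(range)`, and the first `get_bits(f, ilog(range) − 1)` returns into 0x111403 (`At2c`). -/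
def Seg2b (Lay : Layout) (μ : Microarch) (u₀ : State) : Prop :=
  ∀ (others : List Obj) (frames : List (Nat × FrameLayout)) (len : Nat) (Ar : Arena) (stored room : Int)
      (mode : Nat) (ysz : Nat → Nat) (u : State) (ret : Word) (i : Nat) (v : State),
    (At2b u₀ others frames len Ar stored room mode ysz u ret i v) →
    ReachVia Lay μ Vorbis.WayInv v (fun w => At7a u₀ others frames len Ar stored room mode ysz u ret i w ∨ At2c u₀ others frames len Ar stored room mode ysz u ret i w)

/-- **Segment .2c, 0x111403–0x111421** (lines 3240–3241): `finalY[0] = ` the value read, `ilog(range)`, and the second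
`get_bits(f, ilog(range) − 1)` returns into 0x111426 (`At2d`). -/
def Seg2c (Lay : Layout) (μ : Microarch) (u₀ : State) : Prop :=
  ∀ (others : List Obj) (frames : List (Nat × FrameLayout)) (len : Nat) (Ar : Arena) (stored room : Int)
      (mode : Nat) (ysz : Nat → Nat) (u : State) (ret : Word) (i : Nat) (v : State),
    (At2c u₀ others frames len Ar stored room mode ysz u ret i v) →
    ReachVia Lay μ Vorbis.WayInv v (fun w => At2d u₀ others frames len Ar stored room mode ysz u ret i w)

/-- **Segment .2d, 0x111426–0x111452** (lines 3241–3242): `finalY[1] = ` the value read, `offset = 2`, `j = 0`, the spills of `i`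
and `map` → .3 (`At3 … i 0`). -/
def Seg2d (Lay : Layout) (μ : Microarch) (u₀ : State) : Prop :=
  ∀ (others : List Obj) (frames : List (Nat × FrameLayout)) (len : Nat) (Ar : Arena) (stored room : Int)
      (mode : Nat) (ysz : Nat → Nat) (u : State) (ret : Word) (i : Nat) (v : State),
    (At2d u₀ others frames len Ar stored room mode ysz u ret i v) →
    ReachVia Lay μ Vorbis.WayInv v (fun w => At3 u₀ others frames len Ar stored room mode ysz u ret i 0 w)

/-- **The composition of segment .2 from its four parts**: .2a leaves to .8 / .16 or reaches `At2b`; .2b leaves to .7 entry A or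
reaches `At2c`; .2c reaches `At2d`; .2d reaches `At3 … i 0`. Pure logic (`ReachVia.trans`). -/
theorem Seg2.of_parts {Lay : Layout} {μ : Microarch} {u₀ : State}
    (ha : Seg2a Lay μ u₀) (hb : Seg2b Lay μ u₀) (hc : Seg2c Lay μ u₀) (hd : Seg2d Lay μ u₀) : Seg2 Lay μ u₀ := by
  intro others frames len Ar stored room mode ysz u ret i v hat
  refine (ha others frames len Ar stored room mode ysz u ret i v hat).trans ?_
  intro va hva
  rcases hva with h8 | h16 | h2b
  · exact ReachVia.done (Or.inl h8)
  · exact ReachVia.done (Or.inr (Or.inl h16))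
  · refine (hb others frames len Ar stored room mode ysz u ret i va h2b).trans ?_
    intro vb hvb
    rcases hvb with h7 | h2c
    · exact ReachVia.done (Or.inr (Or.inr (Or.inl h7)))
    · refine (hc others frames len Ar stored room mode ysz u ret i vb h2c).trans ?_
      intro vc h2d
      refine (hd others frames len Ar stored room mode ysz u ret i vc h2d).trans ?_
      intro vd h3
      exact ReachVia.done (Or.inr (Or.inr (Or.inr h3)))

end Vorbis.Spec.vorbis_decode_packet_rest
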